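-- pv_equiv track=rewrite | github.com/banteg/crimson | scripts/zensical_fix_md.py | _indent_width
-- ===== SOURCE A (Python) =====
-- def _indent_width(text: str) -> int:
--     width = 0
--     for ch in text:
--         if ch == "\t":
--             width += 4
--         elif ch == " ":
--             width += 1
--         else:
--             break
--     return width
-- ===== SOURCE B (Python) =====
-- from itertools import takewhile
--
-- def _indent_width(text: str) -> int:
--     prefix = "".join(takewhile(lambda c: c in " \t", text))
--     return prefix.count("\t") * 4 + prefix.count(" ")
-- ===== Notes on version B (the rewrite author's own statement) =====
-- stated objective: idiomatic
-- what changed: Replaces the fused loop-with-break and running accumulator by extracting the leading space/tab prefix with takewhile and then summing two independent character counts.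
import Mathlib
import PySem

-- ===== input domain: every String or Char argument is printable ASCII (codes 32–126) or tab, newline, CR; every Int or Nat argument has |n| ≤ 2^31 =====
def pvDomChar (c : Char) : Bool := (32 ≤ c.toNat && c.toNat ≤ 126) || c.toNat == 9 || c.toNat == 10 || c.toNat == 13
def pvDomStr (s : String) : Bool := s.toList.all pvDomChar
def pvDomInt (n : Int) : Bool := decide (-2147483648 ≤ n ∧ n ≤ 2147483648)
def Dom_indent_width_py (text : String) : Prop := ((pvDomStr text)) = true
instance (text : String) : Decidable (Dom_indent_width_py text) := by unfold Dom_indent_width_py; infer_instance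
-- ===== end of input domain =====

-- B replaces A's fused accumulate-and-break loop by takewhile-prefix extraction
-- followed by two independent character counts (objective: idiomatic).

-- ===== PORT A =====
-- A's for-loop with break: structural recursion carrying the running width.
def indentLoopA : List Char → Int → Int
  | [], width => width
  | c :: cs, width =>
      if c = '\t' then indentLoopA cs (width + 4)
      else if c = ' ' then indentLoopA cs (width + 1)
      else width

def indent_width_py (text : String) : Int := indentLoopA text.toList 0

-- ===== PORT B =====
-- takewhile(c in " \t") prefix, then prefix.count('\t')*4 + prefix.count(' ').
def indent_width_py_alt (text : String) : Int :=
  let pfx := text.toList.takeWhile (fun c => c = ' ' || c = '\t')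
  (pfx.count '\t' : Int) * 4 + (pfx.count ' ' : Int)

-- ===== PRECONDITION & SPEC =====
def Spec_indent_width_py (text : String) (out : Int) : Prop := out = indent_width_py_alt text
instance (text : String) (out : Int) : Decidable (Spec_indent_width_py text out) := by unfold Spec_indent_width_py; infer_instance

-- ===== CLAIM (what is proved, stated in full; the proofs are below) =====
def Claim_equal_indent_width_py : Prop := ∀ (text : String), Dom_indent_width_py text → Spec_indent_width_py text (indent_width_py text)

-- ===== LEMMAS AND PROOFS =====
theorem indentLoopA_eq (l : List Char) (w : Int) :
    indentLoopA l w =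
      w + ((l.takeWhile (fun c => c = ' ' || c = '\t')).count '\t' : Int) * 4
        + ((l.takeWhile (fun c => c = ' ' || c = '\t')).count ' ' : Int) := by
  induction l generalizing w with
  | nil => simp [indentLoopA, List.takeWhile]
  | cons c cs ih =>
    by_cases ht : c = '\t'
    · subst ht
      simp [indentLoopA, List.takeWhile, ih, List.count_cons]
      push_cast
      ring
    · by_cases hs : c = ' '
      · subst hs
        simp [indentLoopA, List.takeWhile, ih, List.count_cons]
        push_cast
        ring
      · simp [indentLoopA, List.takeWhile, ht, hs]

-- ===== VERDICT (by name: the statement is the Claim_ definition above) =====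
theorem indent_width_py_spec : Claim_equal_indent_width_py := by
  intro text _
  unfold Spec_indent_width_py indent_width_py indent_width_py_alt
  rw [indentLoopA_eq]
  ring
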